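-- pv_equiv track=rewrite | github.com/raeez/chiral-bar-cobar | scripts/bar_cohomology_v4.py | nbc_basis
-- ===== SOURCE A (Python) =====
-- from itertools import combinations, product as iterproduct
--
-- def nbc_basis(n, k):
--     """
--     NBC basis for OS^k(n) = H^k(Conf_n(ℂ)).
--     Returns list of sorted edge tuples.
--     n: number of points (1-indexed: 1,...,n)
--     k: form degree
--     """
--     if k == 0:
--         return [()]
--     if n <= 1 or k >= n:
--         return [] if k > 0 else [()]
--
--     # All edges of K_n
--     edges = [(i,j) for i in range(1, n+1) for j in range(i+1, n+1)]
--
--     # Broken circuits from 3-cycles (Whitney: these generate all BCs)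
--     broken_circuits = []
--     for i in range(1, n+1):
--         for j in range(i+1, n+1):
--             for kk in range(j+1, n+1):
--                 # Cycle: (i,j), (j,kk), (i,kk). Largest edge = (j,kk) or (i,kk)?
--                 # Lex order: (i,j) < (i,kk) < (j,kk) since i<j<kk
--                 # Largest = (j,kk). BC = {(i,j), (i,kk)}
--                 broken_circuits.append(frozenset([(i,j), (i,kk)]))
--
--     # NBC: k-subsets of edges containing no broken circuit
--     basis = []
--     for subset in combinations(edges, k):
--         subset_set = frozenset(subset)
--         is_nbc = True
--         for bc in broken_circuits:
--             if bc.issubset(subset_set):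
--                 is_nbc = False
--                 break
--         if is_nbc:
--             basis.append(tuple(sorted(subset)))
--
--     return basis
-- ===== SOURCE B (Python) =====
-- def nbc_basis(n, k):
--     """
--     NBC basis for OS^k(n) = H^k(Conf_n(C)) by direct backtracking:
--     an edge set contains no broken circuit iff the smaller endpoints of its
--     edges are pairwise distinct, so enumerate k edges with strictly
--     increasing smaller endpoints, in lex order, with an explicit stack.
--     Note: returns [] for k < 0 (A returns [()] for k < 0 when n <= 1,
--     and raises ValueError for k < 0 when n >= 2).
--     """
--     if k == 0:
--         return [()]
--     if k < 0 or n <= 1 or k >= n: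
--         return []
--     out = []
--     chosen = []   # current partial NBC set (stack of edges)
--     i, j = 1, 2   # candidate edge at the current level
--     while True:
--         if i > n - (k - len(chosen)) + 1:
--             # not enough smaller endpoints left at this level: backtrack
--             if not chosen:
--                 return out
--             i, j = chosen.pop()
--             j += 1
--         elif j > n:
--             i, j = i + 1, i + 2
--         elif len(chosen) + 1 == k:
--             out.append(tuple(chosen) + ((i, j),))
--             j += 1
--         else:
--             chosen.append((i, j))
--             i, j = i + 1, i + 2
-- ===== Notes on version B (the rewrite author's own statement) =====
-- stated objective: alternative
-- what changed: Replaces the scan of all C(n(n-1)/2,k) edge subsets, each tested against an O(n^3) list of broken circuits, by explicit-stack backtracking that only ever builds NBC sets (edges with strictly increasing smaller endpoints), emitted in the same lex order.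
-- intended difference: For k < 0 with n <= 1 A returns [()] through a guard written for positive k, while B returns [], the intended value for a negative form degree. — e.g. on nbc_basis(1, -1): A returns [[]], B returns []
import Mathlib
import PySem

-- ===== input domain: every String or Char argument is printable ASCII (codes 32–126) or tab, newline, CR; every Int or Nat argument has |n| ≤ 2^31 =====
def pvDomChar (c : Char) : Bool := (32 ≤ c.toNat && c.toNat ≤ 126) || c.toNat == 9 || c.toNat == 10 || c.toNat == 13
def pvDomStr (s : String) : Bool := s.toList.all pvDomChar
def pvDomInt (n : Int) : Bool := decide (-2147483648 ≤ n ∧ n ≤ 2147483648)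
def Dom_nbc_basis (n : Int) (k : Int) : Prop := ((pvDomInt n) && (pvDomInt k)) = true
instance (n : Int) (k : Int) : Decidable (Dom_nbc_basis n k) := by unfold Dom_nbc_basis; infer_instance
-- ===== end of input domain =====

-- B replaces A's scan of all k-subsets of edges (each tested against an O(n^3) broken-circuit
-- list) by backtracking that only builds subsets whose smaller endpoints strictly increase;
-- same output in the same order.

-- ===== PORT A =====
-- itertools.combinations(l, r) in itertools' order (hand port, exact: lex order of index subsets)
def combA {α : Type} : List α → Nat → List (List α)
  | _, 0 => [[]]
  | [], _ + 1 => []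
  | x :: xs, r + 1 => ((combA xs r).map (fun s => x :: s)) ++ combA xs (r + 1)

def nbc_basis (n : Int) (k : Int) : List (List (Int × Int)) :=
  if k = 0 then [[]]
  else if n ≤ 1 ∨ n ≤ k then (if 0 < k then [] else [[]])
  else
    -- edges of K_n, lex order
    let edges : List (Int × Int) :=
      (PySem.List.pyRange 1 (n + 1) 1).flatMap (fun i =>
        (PySem.List.pyRange (i + 1) (n + 1) 1).map (fun j => (i, j)))
    -- frozenset([(i,j),(i,kk)]) ported as the 2-element list [(i,j),(i,kk)]
    -- (its elements are distinct and only membership/issubset is ever used)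
    let broken_circuits : List (List (Int × Int)) :=
      (PySem.List.pyRange 1 (n + 1) 1).flatMap (fun i =>
        (PySem.List.pyRange (i + 1) (n + 1) 1).flatMap (fun j =>
          (PySem.List.pyRange (j + 1) (n + 1) 1).map (fun kk => [(i, j), (i, kk)])))
    -- the is_nbc loop with break = "no broken circuit is a subset of subset_set"
    (combA edges k.toNat).foldl (fun basis s =>
      if broken_circuits.any (fun bc => bc.all (fun e => decide (e ∈ s))) then basis
      else basis ++ [PySem.List.sorted s (fun p => (toLex p : Int ×ₗ Int)) false]) []

-- ===== PORT B =====
-- the explicit-stack backtracking loop of Source B; the Python stack `chosen` (append/pop at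
-- the right end) is ported head-first as a cons list, so `tuple(chosen)` is `chosen.reverse`;
-- the fuel argument only makes the loop total: the fuel passed below provably suffices
def loopB (n : Int) (K : Nat) : Nat → List (Int × Int) → Int → Int → List (List (Int × Int)) → List (List (Int × Int))
  | 0, _, _, _, out => out
  | f + 1, chosen, i, j, out =>
    if n - ((K : Int) - chosen.length) + 1 < i then
      match chosen with
      | [] => out
      | (a, b) :: rest => loopB n K f rest a (b + 1) out
    else if n < j then
      loopB n K f chosen (i + 1) (i + 2) out
    else if chosen.length + 1 = K then
      loopB n K f chosen i (j + 1) (out ++ [chosen.reverse ++ [(i, j)]])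
    else
      loopB n K f ((i, j) :: chosen) (i + 1) (i + 2) out

def nbc_basis_alt (n : Int) (k : Int) : List (List (Int × Int)) :=
  if k = 0 then [[]]
  else if k < 0 ∨ n ≤ 1 ∨ n ≤ k then []
  else loopB n k.toNat ((n.toNat + 4) ^ (2 * k.toNat + 2)) [] 1 2 []

-- ===== PRECONDITION & SPEC =====
-- Pre_ excludes exactly k < 0 with n ≥ 2, where A raises ValueError (combinations with negative r).
def Pre_nbc_basis (n : Int) (k : Int) : Prop := 0 ≤ k ∨ n ≤ 1
instance (n : Int) (k : Int) : Decidable (Pre_nbc_basis n k) := by unfold Pre_nbc_basis; infer_instance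
def pvWitness_nbc_basis : Int × Int := (4, 2)

-- For k < 0 with n ≤ 1 A returns [()] through a guard written for positive k,
-- while B returns [], the intended value for a negative form degree.
def D_nbc_basis (n : Int) (k : Int) : Prop := k < 0 ∧ n ≤ 1
instance (n : Int) (k : Int) : Decidable (D_nbc_basis n k) := by unfold D_nbc_basis; infer_instance

def Spec_nbc_basis (n : Int) (k : Int) (out : List (List (Int × Int))) : Prop :=
  ¬ D_nbc_basis n k → out = nbc_basis_alt n k
instance (n : Int) (k : Int) (out : List (List (Int × Int))) : Decidable (Spec_nbc_basis n k out) := by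
  unfold Spec_nbc_basis; infer_instance

def pvDiffWitness_nbc_basis : Int × Int := (1, -1)
def pvDiffWitnessOut_nbc_basis : (List (List (Int × Int))) × (List (List (Int × Int))) := ([[]], [])

-- ===== CLAIM (what is proved, stated in full; the proofs are below) =====
def Claim_unchanged_nbc_basis : Prop := ∀ (n : Int) (k : Int), Dom_nbc_basis n k → Pre_nbc_basis n k → Spec_nbc_basis n k (nbc_basis n k)
def Claim_changed_nbc_basis : Prop := Dom_nbc_basis (pvDiffWitness_nbc_basis.1) (pvDiffWitness_nbc_basis.2) ∧ Pre_nbc_basis (pvDiffWitness_nbc_basis.1) (pvDiffWitness_nbc_basis.2) ∧ D_nbc_basis (pvDiffWitness_nbc_basis.1) (pvDiffWitness_nbc_basis.2) ∧ nbc_basis (pvDiffWitness_nbc_basis.1) (pvDiffWitness_nbc_basis.2) = pvDiffWitnessOut_nbc_basis.1 ∧ nbc_basis_alt (pvDiffWitness_nbc_basis.1) (pvDiffWitness_nbc_basis.2) = pvDiffWitnessOut_nbc_basis.2 ∧ pvDiffWitnessOut_nbc_basis.1 ≠ pvDiffWitnessOut_nbc_basis.2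
def Claim_exact_nbc_basis : Prop := ∀ (n : Int) (k : Int), Dom_nbc_basis n k → Pre_nbc_basis n k → D_nbc_basis n k → nbc_basis n k ≠ nbc_basis_alt n k

-- ===== LEMMAS AND PROOFS =====

-- proof-only abbreviations
def pvBlock (n i : Int) : List (Int × Int) :=
  (PySem.List.pyRange (i + 1) (n + 1) 1).map (fun j => (i, j))

def pvEdgesFrom (n lo : Int) : List (Int × Int) :=
  (PySem.List.pyRange lo (n + 1) 1).flatMap (fun i => pvBlock n i)

def pvBCs (n : Int) : List (List (Int × Int)) :=
  (PySem.List.pyRange 1 (n + 1) 1).flatMap (fun i =>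
    (PySem.List.pyRange (i + 1) (n + 1) 1).flatMap (fun j =>
      (PySem.List.pyRange (j + 1) (n + 1) 1).map (fun kk => [(i, j), (i, kk)])))

-- pvExt n r lo: all r-edge NBC tails with smaller endpoints ≥ lo, in lex order
def pvExt (n : Int) : Nat → Int → List (List (Int × Int))
  | 0, _ => [[]]
  | r + 1, lo =>
      (PySem.List.pyRange lo (n + 1) 1).flatMap (fun i =>
        (PySem.List.pyRange (i + 1) (n + 1) 1).flatMap (fun j =>
          (pvExt n r (i + 1)).map (fun t => (i, j) :: t)))

-- distinct smaller endpoints, as a Bool predicate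
def pvQ (s : List (Int × Int)) : Bool := decide (s.Pairwise (fun a b => a.1 ≠ b.1))

-- strict lex order on pairs
def pvLexLt (a b : Int × Int) : Prop := a.1 < b.1 ∨ (a.1 = b.1 ∧ a.2 < b.2)

theorem pv_foldl_filter (l : List (List (Int × Int))) (p : List (Int × Int) → Bool)
    (f : List (Int × Int) → List (Int × Int)) (acc : List (List (Int × Int))) :
    l.foldl (fun basis s => if p s then basis else basis ++ [f s]) acc
      = acc ++ (l.filter (fun s => !p s)).map f := by
  induction l generalizing acc with
  | nil => simp
  | cons x xs ih =>
    by_cases h : p x <;> simp [h, ih, List.append_assoc]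

theorem pv_mem_combA_sublist {α : Type} (l : List α) (r : Nat) (s : List α)
    (hs : s ∈ combA l r) : s.Sublist l := by
  induction l generalizing r s with
  | nil =>
    cases r with
    | zero => simp [combA] at hs; simp [hs]
    | succ r => simp [combA] at hs
  | cons x xs ih =>
    cases r with
    | zero => simp [combA] at hs; simp [hs]
    | succ r =>
      simp [combA] at hs
      rcases hs with ⟨t, ht, rfl⟩ | hs
      · exact List.Sublist.cons₂ x (ih r t ht)
      · exact List.Sublist.cons x (ih (r + 1) s hs)

theorem pv_combA_zero {α : Type} (l : List α) : combA l 0 = [[]] := by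
  cases l <;> rfl

-- skip lemma: subsets drawn from c ++ rest but forbidden to touch first coordinate i
-- (which all of c carries) are exactly the subsets drawn from rest
theorem pv_skip (i : Int) (c rest : List (Int × Int)) (r : Nat)
    (hc : ∀ y ∈ c, y.1 = i) :
    (combA (c ++ rest) r).filter (fun s => decide ((∀ y ∈ s, y.1 ≠ i) ∧ s.Pairwise (fun a b => a.1 ≠ b.1)))
      = (combA rest r).filter (fun s => decide ((∀ y ∈ s, y.1 ≠ i) ∧ s.Pairwise (fun a b => a.1 ≠ b.1))) := by
  induction c generalizing r with
  | nil => rfl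
  | cons y c ih =>
    cases r with
    | zero => simp [pv_combA_zero]
    | succ r =>
      have hy : y.1 = i := hc y (by simp)
      simp only [List.cons_append, combA, List.filter_append, List.filter_map]
      have hfalse : (fun s => decide ((∀ z ∈ s, z.1 ≠ i) ∧ s.Pairwise (fun a b => a.1 ≠ b.1))) ∘ (fun s => y :: s)
          = fun _ => false := by
        funext s
        simp only [Function.comp]
        simp [hy]
      rw [hfalse]
      simp only [List.filter_false, List.map_nil, List.nil_append]
      exact ih (r + 1) (fun z hz => hc z (List.mem_cons_of_mem y hz))

-- block lemma: peeling one block (constant first coordinate i) off the edge list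
theorem pv_block_lemma (i : Int) (b rest : List (Int × Int)) (r : Nat)
    (hb : ∀ y ∈ b, y.1 = i) (hrest : ∀ y ∈ rest, y.1 ≠ i) :
    (combA (b ++ rest) (r + 1)).filter pvQ
      = b.flatMap (fun x => ((combA rest r).filter pvQ).map (fun s => x :: s))
        ++ (combA rest (r + 1)).filter pvQ := by
  induction b with
  | nil => simp
  | cons x b ihb =>
    have hx : x.1 = i := hb x (by simp)
    simp only [List.cons_append, combA, List.filter_append, List.filter_map, List.flatMap_cons]
    have hcomp : (pvQ ∘ (fun s => x :: s))
        = fun s => decide ((∀ y ∈ s, y.1 ≠ i) ∧ s.Pairwise (fun a b => a.1 ≠ b.1)) := by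
      funext s
      simp only [Function.comp, pvQ, decide_eq_decide]
      rw [List.pairwise_cons]
      constructor
      · rintro ⟨h1, h2⟩
        refine ⟨fun y hy => ?_, h2⟩
        have := h1 y hy; omega
      · rintro ⟨h1, h2⟩
        refine ⟨fun y hy => ?_, h2⟩
        have := h1 y hy; omega
    have h1 : List.filter (pvQ ∘ (fun s => x :: s)) (combA (b ++ rest) r)
        = (combA rest r).filter pvQ := by
      rw [hcomp, pv_skip i b rest r (fun y hy => hb y (List.mem_cons_of_mem x hy))]
      apply List.filter_congr
      intro s hs
      have hsub := pv_mem_combA_sublist rest r s hs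
      simp only [pvQ, decide_eq_decide]
      constructor
      · exact fun h => h.2
      · intro h
        exact ⟨fun y hy => hrest y (hsub.subset hy), h⟩
    rw [h1, ihb (fun y hy => hb y (List.mem_cons_of_mem x hy))]
    simp [List.append_assoc]

theorem pv_mem_edgesFrom (n lo : Int) (y : Int × Int) (hy : y ∈ pvEdgesFrom n lo) :
    lo ≤ y.1 ∧ y.1 < y.2 ∧ y.2 ≤ n := by
  simp only [pvEdgesFrom, pvBlock, List.mem_flatMap, List.mem_map,
    PySem.List.mem_pyRange_one] at hy
  rcases hy with ⟨i, hi, j, hj, rfl⟩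
  exact ⟨hi.1, by omega, by omega⟩

theorem pv_edgesFrom_cons (n lo : Int) (h : lo < n + 1) :
    pvEdgesFrom n lo = pvBlock n lo ++ pvEdgesFrom n (lo + 1) := by
  simp only [pvEdgesFrom]
  rw [PySem.List.pyRange_one_cons h, List.flatMap_cons]

theorem pv_edgesFrom_nil (n lo : Int) (h : n + 1 ≤ lo) : pvEdgesFrom n lo = [] := by
  simp [pvEdgesFrom, PySem.List.pyRange_one_eq_nil h]

-- the main induction: filtering A's combinations = B's unpruned backtracking
theorem pv_main_aux (n : Int) (r : Nat)
    (IH : ∀ lo, (combA (pvEdgesFrom n lo) r).filter pvQ = pvExt n r lo) :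
    ∀ (m : Nat) (lo : Int), (n + 1 - lo).toNat = m →
      (combA (pvEdgesFrom n lo) (r + 1)).filter pvQ = pvExt n (r + 1) lo := by
  intro m
  induction m with
  | zero =>
    intro lo h
    have h1 : n + 1 ≤ lo := by omega
    rw [pv_edgesFrom_nil n lo h1]
    simp [combA, pvExt, PySem.List.pyRange_one_eq_nil h1]
  | succ m ihm =>
    intro lo h
    have hlo : lo < n + 1 := by omega
    rw [pv_edgesFrom_cons n lo hlo]
    rw [pv_block_lemma lo (pvBlock n lo) (pvEdgesFrom n (lo + 1)) r
      (by intro y hy; simp only [pvBlock, List.mem_map] at hy; rcases hy with ⟨j, _, rfl⟩; rfl)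
      (by intro y hy; have := pv_mem_edgesFrom n (lo + 1) y hy; omega)]
    rw [IH (lo + 1), ihm (lo + 1) (by omega)]
    show _ = pvExt n (r + 1) lo
    simp only [pvExt]
    rw [PySem.List.pyRange_one_cons hlo, List.flatMap_cons]
    congr 1
    simp only [pvBlock, List.flatMap_map]

theorem pv_main (n : Int) (r : Nat) (lo : Int) :
    (combA (pvEdgesFrom n lo) r).filter pvQ = pvExt n r lo := by
  induction r generalizing lo with
  | zero => simp [pv_combA_zero, pvExt, pvQ]
  | succ r ihr =>
    exact pv_main_aux n r (fun lo' => ihr lo') ((n + 1 - lo).toNat) lo rfl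

-- pruning: the recursion is empty as soon as fewer than r smaller endpoints remain
theorem pv_ext_empty (n : Int) :
    ∀ (r : Nat) (lo : Int), 1 ≤ r → n - r + 1 < lo → pvExt n r lo = [] := by
  intro r
  induction r with
  | zero => intro lo h; omega
  | succ r ihr =>
    intro lo _ hlo
    by_cases hr : r = 0
    · subst hr
      have : (n : Int) + 1 ≤ lo := by omega
      simp [pvExt, PySem.List.pyRange_one_eq_nil this]
    · simp only [pvExt, List.flatMap_eq_nil_iff]
      intro i hi
      rw [PySem.List.mem_pyRange_one] at hi
      have : pvExt n r (i + 1) = [] := by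
        apply ihr (i + 1) (by omega) (by omega)
      simp [this]

-- ---- B side: ghost description of the stack loop ----

-- pvTail n r i j: completions of the current level, candidate edge (i, j), r edges still needed
def pvTail (n : Int) (r : Nat) (i j : Int) : List (List (Int × Int)) :=
  if i ≤ n - (r : Int) + 1 then
    ((PySem.List.pyRange j (n + 1) 1).flatMap (fun j' =>
      (pvExt n (r - 1) (i + 1)).map (fun t => (i, j') :: t))) ++ pvExt n r (i + 1)
  else []

-- pvFut n K c i j: everything the loop will still emit from state (c, i, j)
def pvFut (n : Int) (K : Nat) : List (Int × Int) → Int → Int → List (List (Int × Int))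
  | [], i, j => pvTail n K i j
  | x :: c, i, j =>
      (pvTail n (K - (c.length + 1)) i j).map (fun t => (x :: c).reverse ++ t)
        ++ pvFut n K c x.1 (x.2 + 1)

theorem pv_ext_succ_cons (n : Int) (r : Nat) (lo : Int) (h : lo < n + 1) :
    pvExt n (r + 1) lo
      = ((PySem.List.pyRange (lo + 1) (n + 1) 1).flatMap (fun j =>
          (pvExt n r (lo + 1)).map (fun t => (lo, j) :: t))) ++ pvExt n (r + 1) (lo + 1) := by
  conv_lhs => rw [pvExt, PySem.List.pyRange_one_cons h, List.flatMap_cons]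
  rfl

-- T0: level already exhausted
theorem pv_tail_done (n : Int) (r : Nat) (i j : Int) (h : n - (r : Int) + 1 < i) :
    pvTail n r i j = [] := by
  rw [pvTail, if_neg (by omega)]

-- T4: a whole fresh level is exactly pvExt
theorem pv_tail_full (n : Int) (r : Nat) (lo : Int) (hr : 1 ≤ r) :
    pvTail n r lo (lo + 1) = pvExt n r lo := by
  obtain ⟨r', rfl⟩ : ∃ r', r = r' + 1 := ⟨r - 1, by omega⟩
  by_cases h : lo ≤ n - ((r' + 1 : Nat) : Int) + 1
  · rw [pvTail, if_pos h]
    have hlo : lo < n + 1 := by push_cast at h ⊢; omega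
    rw [pv_ext_succ_cons n r' lo hlo]
    rfl
  · rw [pvTail, if_neg h, pv_ext_empty n (r' + 1) lo (by omega) (by push_cast at h ⊢; omega)]

-- T1: the j-range ran out, move to the next smaller endpoint
theorem pv_tail_adv (n : Int) (r : Nat) (i j : Int) (hr : 1 ≤ r) (hj : n < j) :
    pvTail n r i j = pvTail n r (i + 1) (i + 2) := by
  have hfull : pvTail n r (i + 1) (i + 2) = pvExt n r (i + 1) := by
    rw [show (i + 2 : Int) = (i + 1) + 1 from by ring]
    exact pv_tail_full n r (i + 1) hr
  rw [hfull]
  by_cases h : i ≤ n - (r : Int) + 1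
  · rw [pvTail, if_pos h, PySem.List.pyRange_one_eq_nil (by omega)]
    simp
  · rw [pvTail, if_neg h, pv_ext_empty n r (i + 1) (by omega) (by omega)]

-- T3': peel the candidate edge (i, j) off the current level
theorem pv_tail_step (n : Int) (r : Nat) (i j : Int) (hi : i ≤ n - (r : Int) + 1) (hj : j ≤ n) :
    pvTail n r i j
      = (pvExt n (r - 1) (i + 1)).map (fun t => (i, j) :: t) ++ pvTail n r i (j + 1) := by
  rw [pvTail, if_pos hi, pvTail, if_pos hi]
  rw [PySem.List.pyRange_one_cons (by omega : j < n + 1), List.flatMap_cons, List.append_assoc]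

-- ---- the termination measure ----
def pvEnc (n : Int) (i j : Int) : Nat := i.toNat * (n.toNat + 4) + j.toNat
def pvE (n : Int) : Nat := (n.toNat + 4) ^ 2

def pvU (n : Int) : List (Int × Int) → Nat
  | [] => 0
  | x :: c => pvU n c * pvE n + pvEnc n x.1 x.2

def pvV (n : Int) (K : Nat) (c : List (Int × Int)) (i j : Int) : Nat :=
  (pvU n c * pvE n + pvEnc n i j) * pvE n ^ (K - 1 - c.length)

-- the loop invariant on the state
def pvVal (n : Int) (K : Nat) (c : List (Int × Int)) (i j : Int) : Prop :=
  c.length < K ∧ 1 ≤ i ∧ i + 1 ≤ j ∧ i ≤ n + 2 ∧ j ≤ n + 3 ∧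
    ∀ e ∈ c, 1 ≤ e.1 ∧ e.1 < e.2 ∧ e.2 ≤ n

theorem pv_enc_lt (n i j : Int) (hi0 : 0 ≤ i) (hi : i ≤ n + 2) (hj0 : 0 ≤ j) (hj : j ≤ n + 3) :
    pvEnc n i j < pvE n := by
  have h1 : i.toNat ≤ n.toNat + 2 := by omega
  have h2 : j.toNat ≤ n.toNat + 3 := by omega
  have := Nat.mul_le_mul_right (n.toNat + 4) h1
  rw [pvEnc, pvE]
  nlinarith

theorem pv_enc_pos (n i j : Int) (hi : 1 ≤ i) : 1 ≤ pvEnc n i j := by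
  have h1 : 1 ≤ i.toNat := by omega
  rw [pvEnc]
  calc 1 ≤ 1 * (n.toNat + 4) := by omega
    _ ≤ i.toNat * (n.toNat + 4) := Nat.mul_le_mul_right _ h1
    _ ≤ i.toNat * (n.toNat + 4) + j.toNat := Nat.le_add_right _ _

theorem pv_enc_succ (n i j : Int) (hj : 0 ≤ j) : pvEnc n i (j + 1) = pvEnc n i j + 1 := by
  rw [pvEnc, pvEnc]
  omega

theorem pv_enc_adv (n i j : Int) (hi : 1 ≤ i) (hj : j ≤ n + 3) :
    pvEnc n i j < pvEnc n (i + 1) (i + 2) := by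
  have h1 : (i + 1).toNat = i.toNat + 1 := by omega
  have h2 : (i + 2).toNat = i.toNat + 2 := by omega
  rw [pvEnc, pvEnc, h1, h2]
  have hJ : j.toNat < (n.toNat + 4) + (i.toNat + 2) := by omega
  calc i.toNat * (n.toNat + 4) + j.toNat
      < i.toNat * (n.toNat + 4) + ((n.toNat + 4) + (i.toNat + 2)) := Nat.add_lt_add_left hJ _
    _ = (i.toNat + 1) * (n.toNat + 4) + (i.toNat + 2) := by ring

theorem pv_U_le (n : Int) (c : List (Int × Int)) (hc : ∀ e ∈ c, 1 ≤ e.1 ∧ e.1 < e.2 ∧ e.2 ≤ n) :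
    pvU n c ≤ pvE n ^ c.length - 1 := by
  induction c with
  | nil => simp [pvU]
  | cons x c ih =>
    have hx := hc x (by simp)
    have henc : pvEnc n x.1 x.2 < pvE n :=
      pv_enc_lt n x.1 x.2 (by omega) (by omega) (by omega) (by omega)
    have hU := ih (fun e he => hc e (List.mem_cons_of_mem x he))
    have hEpos : 0 < pvE n := by rw [pvE]; exact Nat.pow_pos (by omega)
    have hEp : 1 ≤ pvE n ^ c.length := Nat.one_le_pow _ _ hEpos
    rw [pvU, List.length_cons, pow_succ]
    have h2 := Nat.mul_le_mul_right (pvE n) hU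
    rw [Nat.sub_mul, one_mul] at h2
    have hB : pvE n ≤ pvE n ^ c.length * pvE n := by
      calc pvE n = 1 * pvE n := (one_mul _).symm
        _ ≤ pvE n ^ c.length * pvE n := Nat.mul_le_mul_right _ hEp
    generalize pvU n c * pvE n = A at h2 ⊢
    generalize pvE n ^ c.length * pvE n = B at h2 hB ⊢
    omega

theorem pv_V_lt (n : Int) (K : Nat) (c : List (Int × Int)) (i j : Int)
    (hval : pvVal n K c i j) : pvV n K c i j < pvE n ^ (K + 1) := by
  obtain ⟨hm, hi1, hij, hin, hjn, hc⟩ := hval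
  have hU := pv_U_le n c hc
  have henc : pvEnc n i j < pvE n := pv_enc_lt n i j (by omega) hin (by omega) hjn
  have hEpos : 0 < pvE n := by rw [pvE]; exact Nat.pow_pos (by omega)
  have hEp : 1 ≤ pvE n ^ c.length := Nat.one_le_pow _ _ hEpos
  have h1 : pvU n c * pvE n + pvEnc n i j < pvE n ^ (c.length + 1) := by
    have h2 := Nat.mul_le_mul_right (pvE n) hU
    rw [Nat.sub_mul, one_mul] at h2
    have hB : pvE n ≤ pvE n ^ c.length * pvE n := by
      calc pvE n = 1 * pvE n := (one_mul _).symm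
        _ ≤ pvE n ^ c.length * pvE n := Nat.mul_le_mul_right _ hEp
    rw [pow_succ]
    generalize pvU n c * pvE n = A at h2 ⊢
    generalize pvE n ^ c.length * pvE n = B at h2 hB ⊢
    omega
  calc pvV n K c i j
      < pvE n ^ (c.length + 1) * pvE n ^ (K - 1 - c.length) :=
        (Nat.mul_lt_mul_right (Nat.pow_pos hEpos)).mpr h1
    _ = pvE n ^ ((c.length + 1) + (K - 1 - c.length)) := by rw [← pow_add]
    _ ≤ pvE n ^ (K + 1) := Nat.pow_le_pow_right (by omega) (by omega)

-- strict measure increase, one lemma per loop branch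
theorem pv_V_backtrack (n : Int) (K : Nat) (a b : Int) (c : List (Int × Int)) (i j : Int)
    (hval : pvVal n K ((a, b) :: c) i j) :
    pvV n K ((a, b) :: c) i j < pvV n K c a (b + 1) := by
  obtain ⟨hm, hi1, hij, hin, hjn, hc⟩ := hval
  have hab := hc (a, b) (by simp)
  simp only at hab
  obtain ⟨e, he1, he2⟩ : ∃ e, K - 1 - (c.length + 1) = e ∧ K - 1 - c.length = e + 1 := by
    rw [List.length_cons] at hm
    exact ⟨K - 2 - c.length, by omega, by omega⟩
  have henc : pvEnc n i j < pvE n := pv_enc_lt n i j (by omega) hin (by omega) hjn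
  have hEpos : 0 < pvE n := by rw [pvE]; exact Nat.pow_pos (by omega)
  rw [pvV, pvV, List.length_cons, he1, he2, pvU,
    pv_enc_succ n a b (by omega)]
  have hlt : pvEnc n i j * pvE n ^ e < pvE n ^ (e + 1) := by
    calc pvEnc n i j * pvE n ^ e < pvE n * pvE n ^ e :=
          (Nat.mul_lt_mul_right (Nat.pow_pos hEpos)).mpr henc
      _ = pvE n ^ (e + 1) := by rw [pow_succ]; ring
  calc ((pvU n c * pvE n + pvEnc n a b) * pvE n + pvEnc n i j) * pvE n ^ e
      = (pvU n c * pvE n + pvEnc n a b) * pvE n ^ (e + 1) + pvEnc n i j * pvE n ^ e := by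
        rw [pow_succ]; ring
    _ < (pvU n c * pvE n + pvEnc n a b) * pvE n ^ (e + 1) + pvE n ^ (e + 1) :=
        Nat.add_lt_add_left hlt _
    _ = (pvU n c * pvE n + (pvEnc n a b + 1)) * pvE n ^ (e + 1) := by ring

theorem pv_V_adv (n : Int) (K : Nat) (c : List (Int × Int)) (i j : Int)
    (hval : pvVal n K c i j) :
    pvV n K c i j < pvV n K c (i + 1) (i + 2) := by
  obtain ⟨hm, hi1, hij, hin, hjn, hc⟩ := hval
  have hEpos : 0 < pvE n := by rw [pvE]; exact Nat.pow_pos (by omega)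
  rw [pvV, pvV]
  exact (Nat.mul_lt_mul_right (Nat.pow_pos hEpos)).mpr
    (Nat.add_lt_add_left (pv_enc_adv n i j hi1 hjn) _)

theorem pv_V_emit (n : Int) (K : Nat) (c : List (Int × Int)) (i j : Int)
    (hval : pvVal n K c i j) :
    pvV n K c i j < pvV n K c i (j + 1) := by
  obtain ⟨hm, hi1, hij, hin, hjn, hc⟩ := hval
  have hEpos : 0 < pvE n := by rw [pvE]; exact Nat.pow_pos (by omega)
  rw [pvV, pvV, pv_enc_succ n i j (by omega)]
  exact (Nat.mul_lt_mul_right (Nat.pow_pos hEpos)).mpr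
    (Nat.add_lt_add_left (Nat.lt_succ_self _) _)

theorem pv_V_descend (n : Int) (K : Nat) (c : List (Int × Int)) (i j : Int)
    (hval : pvVal n K c i j) (hlen : c.length + 1 < K) :
    pvV n K c i j < pvV n K ((i, j) :: c) (i + 1) (i + 2) := by
  obtain ⟨hm, hi1, hij, hin, hjn, hc⟩ := hval
  obtain ⟨e, he1, he2⟩ : ∃ e, K - 1 - (c.length + 1) = e ∧ K - 1 - c.length = e + 1 :=
    ⟨K - 2 - c.length, by omega, by omega⟩
  have hEpos : 0 < pvE n := by rw [pvE]; exact Nat.pow_pos (by omega)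
  have hEe : 1 ≤ pvE n ^ e := Nat.one_le_pow _ _ hEpos
  have henc : 1 ≤ pvEnc n (i + 1) (i + 2) := pv_enc_pos n (i + 1) (i + 2) (by omega)
  rw [pvV, pvV, List.length_cons, he1, he2, pvU]
  calc (pvU n c * pvE n + pvEnc n i j) * pvE n ^ (e + 1)
      = ((pvU n c * pvE n + pvEnc n i j) * pvE n) * pvE n ^ e := by rw [pow_succ]; ring
    _ < ((pvU n c * pvE n + pvEnc n i j) * pvE n + pvEnc n (i + 1) (i + 2)) * pvE n ^ e := by
        apply (Nat.mul_lt_mul_right (Nat.pow_pos hEpos)).mpr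
        exact Nat.lt_add_of_pos_right (by omega)

-- one step of pvFut per loop branch
theorem pv_fut_adv (n : Int) (K : Nat) (c : List (Int × Int)) (i j : Int)
    (hlen : c.length < K) (hj : n < j) :
    pvFut n K c i j = pvFut n K c (i + 1) (i + 2) := by
  cases c with
  | nil => rw [pvFut, pvFut, pv_tail_adv n K i j (by omega) hj]
  | cons x c =>
    rw [pvFut, pvFut, pv_tail_adv n (K - (c.length + 1)) i j (by simp at hlen; omega) hj]

theorem pv_fut_emit (n : Int) (K : Nat) (c : List (Int × Int)) (i j : Int)
    (hlen : c.length + 1 = K) (hi : i ≤ n - ((K : Int) - c.length) + 1) (hj : j ≤ n) :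
    pvFut n K c i j = (c.reverse ++ [(i, j)]) :: pvFut n K c i (j + 1) := by
  have hi' : i ≤ n - ((1 : Nat) : Int) + 1 := by
    have : ((K : Int) - c.length) = 1 := by omega
    omega
  cases c with
  | nil =>
    have hK : K = 1 := by simpa using hlen.symm
    subst hK
    rw [pvFut, pvFut, pv_tail_step n 1 i j hi' hj]
    simp [pvExt]
  | cons x c =>
    have hK : K - (c.length + 1) = 1 := by simp at hlen; omega
    rw [pvFut, pvFut, hK, pv_tail_step n 1 i j hi' hj]
    simp [pvExt, List.reverse_cons, List.append_assoc]

theorem pv_fut_descend (n : Int) (K : Nat) (c : List (Int × Int)) (i j : Int)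
    (hlen : c.length + 1 < K) (hi : i ≤ n - ((K : Int) - c.length) + 1) (hj : j ≤ n) :
    pvFut n K c i j = pvFut n K ((i, j) :: c) (i + 1) (i + 2) := by
  have hi' : i ≤ n - ((K - c.length : Nat) : Int) + 1 := by
    have : ((K - c.length : Nat) : Int) = (K : Int) - c.length := by omega
    omega
  cases c with
  | nil =>
    have hfull : pvTail n (K - (([] : List (Int × Int)).length + 1)) (i + 1) (i + 2)
        = pvExt n (K - 1) (i + 1) := by
      rw [show (i + 2 : Int) = (i + 1) + 1 from by ring]
      simp only [List.length_nil, Nat.zero_add]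
      exact pv_tail_full n (K - 1) (i + 1) (by omega)
    rw [pvFut, pvFut, hfull, pv_tail_step n K i j (by simpa using hi') hj, pvFut]
    have hK1 : K - 1 = K - (0 + 1) := by omega
    simp [hK1]
  | cons x c =>
    have hfull : pvTail n (K - ((x :: c).length + 1)) (i + 1) (i + 2)
        = pvExt n (K - (c.length + 1) - 1) (i + 1) := by
      rw [show (i + 2 : Int) = (i + 1) + 1 from by ring,
        show K - ((x :: c).length + 1) = K - (c.length + 1) - 1 from by simp; omega]
      exact pv_tail_full n (K - (c.length + 1) - 1) (i + 1) (by simp at hlen; omega)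
    rw [pvFut, pvFut, hfull, pv_tail_step n (K - (c.length + 1)) i j (by simpa using hi') hj,
      pvFut]
    simp [List.map_append, List.map_map, Function.comp, List.reverse_cons, List.append_assoc]

theorem pv_loopB_succ (n : Int) (K : Nat) (f : Nat) (chosen : List (Int × Int)) (i j : Int)
    (out : List (List (Int × Int))) :
    loopB n K (f + 1) chosen i j out =
      (if n - ((K : Int) - chosen.length) + 1 < i then
        match chosen with
        | [] => out
        | (a, b) :: rest => loopB n K f rest a (b + 1) out
      else if n < j then
        loopB n K f chosen (i + 1) (i + 2) out
      else if chosen.length + 1 = K then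
        loopB n K f chosen i (j + 1) (out ++ [chosen.reverse ++ [(i, j)]])
      else
        loopB n K f ((i, j) :: chosen) (i + 1) (i + 2) out) := rfl

-- the loop computes out ++ pvFut, given enough fuel
theorem pv_loop (n : Int) (K : Nat) (hn : 2 ≤ n) (hKn : (K : Int) < n) :
    ∀ (f : Nat) (c : List (Int × Int)) (i j : Int) (out : List (List (Int × Int))),
      pvVal n K c i j → pvE n ^ (K + 1) ≤ pvV n K c i j + f →
      loopB n K f c i j out = out ++ pvFut n K c i j := by
  intro f
  induction f with
  | zero =>
    intro c i j out hval hfuel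
    have := pv_V_lt n K c i j hval
    omega
  | succ f ih =>
    intro c i j out hval hfuel
    obtain ⟨hm, hi1, hij, hin, hjn, hc⟩ := hval
    rw [pv_loopB_succ]
    by_cases h1 : n - ((K : Int) - c.length) + 1 < i
    · rw [if_pos h1]
      cases c with
      | nil =>
        have : pvTail n K i j = [] := pv_tail_done n K i j (by simpa using h1)
        rw [pvFut, this, List.append_nil]
      | cons x c =>
        obtain ⟨a, b⟩ := x
        have hab := hc (a, b) (by simp)
        simp only at hab
        have hval' : pvVal n K c a (b + 1) := by
          refine ⟨by simp at hm; omega, by omega, by omega, by omega, by omega, ?_⟩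
          intro e he; exact hc e (List.mem_cons_of_mem _ he)
        have hV := pv_V_backtrack n K a b c i j ⟨hm, hi1, hij, hin, hjn, hc⟩
        show loopB n K f c a (b + 1) out = out ++ pvFut n K ((a, b) :: c) i j
        rw [ih c a (b + 1) out hval' (by omega)]
        have htail : pvTail n (K - (c.length + 1)) i j = [] := by
          apply pv_tail_done
          have : ((K - (c.length + 1) : Nat) : Int) = (K : Int) - (c.length + 1) := by
            simp at hm; omega
          rw [this]
          simp at h1
          omega
        rw [pvFut, htail]
        simp
    · rw [if_neg h1]
      by_cases h2 : n < j
      · rw [if_pos h2]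
        have hval' : pvVal n K c (i + 1) (i + 2) := by
          refine ⟨hm, by omega, by omega, ?_, ?_, hc⟩
          · have : ((K : Int) - c.length) ≥ 1 := by omega
            omega
          · have : ((K : Int) - c.length) ≥ 1 := by omega
            omega
        have hV := pv_V_adv n K c i j ⟨hm, hi1, hij, hin, hjn, hc⟩
        rw [ih c (i + 1) (i + 2) out hval' (by omega)]
        rw [pv_fut_adv n K c i j hm h2]
      · rw [if_neg h2]
        by_cases h3 : c.length + 1 = K
        · rw [if_pos h3]
          have hval' : pvVal n K c i (j + 1) :=
            ⟨hm, hi1, by omega, hin, by omega, hc⟩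
          have hV := pv_V_emit n K c i j ⟨hm, hi1, hij, hin, hjn, hc⟩
          rw [ih c i (j + 1) _ hval' (by omega)]
          rw [pv_fut_emit n K c i j h3 (by omega) (by omega)]
          simp
        · rw [if_neg h3]
          have hval' : pvVal n K ((i, j) :: c) (i + 1) (i + 2) := by
            refine ⟨by simp; omega, by omega, by omega, by omega, by omega, ?_⟩
            intro e he
            rcases List.mem_cons.mp he with rfl | he'
            · exact ⟨by omega, by omega, by omega⟩
            · exact hc e he'
          have hV := pv_V_descend n K c i j ⟨hm, hi1, hij, hin, hjn, hc⟩ (by omega)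
          rw [ih ((i, j) :: c) (i + 1) (i + 2) out hval' (by omega)]
          rw [pv_fut_descend n K c i j (by omega) (by omega) (by omega)]

-- edges are strictly lex-increasing
theorem pv_edgesFrom_pairwise (n : Int) :
    ∀ (m : Nat) (lo : Int), (n + 1 - lo).toNat = m → (pvEdgesFrom n lo).Pairwise pvLexLt := by
  intro m
  induction m with
  | zero =>
    intro lo h
    rw [pv_edgesFrom_nil n lo (by omega)]
    exact List.Pairwise.nil
  | succ m ihm =>
    intro lo h
    rw [pv_edgesFrom_cons n lo (by omega)]
    rw [List.pairwise_append]
    refine ⟨?_, ihm (lo + 1) (by omega), ?_⟩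
    · apply List.Pairwise.map
      · intro j j' hjj'
        exact Or.inr ⟨rfl, hjj'⟩
      · exact PySem.List.pairwise_lt_pyRange_one (lo + 1) (n + 1)
    · intro x hx y hy
      have hx1 : x.1 = lo := by
        simp only [pvBlock, List.mem_map] at hx
        rcases hx with ⟨j, _, rfl⟩; rfl
      have := pv_mem_edgesFrom n (lo + 1) y hy
      exact Or.inl (by omega)

-- the broken-circuit test says exactly: two edges share their smaller endpoint
theorem pv_bc_mem (n i j kk : Int) (h1 : 1 ≤ i) (h2 : i < j) (h3 : j < kk) (h4 : kk ≤ n) :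
    [(i, j), (i, kk)] ∈ pvBCs n := by
  simp only [pvBCs, List.mem_flatMap, List.mem_map, PySem.List.mem_pyRange_one]
  exact ⟨i, ⟨by omega, by omega⟩, j, ⟨by omega, by omega⟩, kk, ⟨by omega, by omega⟩, rfl⟩

theorem pv_bc_char (n : Int) (s : List (Int × Int))
    (hmem : ∀ y ∈ s, 1 ≤ y.1 ∧ y.1 < y.2 ∧ y.2 ≤ n)
    (hpw : s.Pairwise pvLexLt) :
    ((pvBCs n).any (fun bc => bc.all (fun e => decide (e ∈ s)))) = !pvQ s := by
  rcases hq : pvQ s with _ | _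
  · -- pvQ s = false : distinct-first fails, find a broken circuit inside s
    simp only [pvQ, decide_eq_false_iff_not] at hq
    rw [List.pairwise_iff_forall_sublist] at hq
    push_neg at hq
    rcases hq with ⟨a, b, hab, h1⟩
    have hlex : pvLexLt a b := List.pairwise_iff_forall_sublist.mp hpw hab
    have ha : a ∈ s := hab.subset (by simp)
    have hb : b ∈ s := hab.subset (by simp)
    have h2 : a.2 < b.2 := by
      rcases hlex with h | h
      · omega
      · exact h.2
    have hbc : [(a.1, a.2), (a.1, b.2)] ∈ pvBCs n := by
      have hA := hmem a ha
      have hB := hmem b hb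
      exact pv_bc_mem n a.1 a.2 b.2 (by omega) (by omega) (by omega) (by omega)
    simp only [Bool.not_false, List.any_eq_true]
    refine ⟨[(a.1, a.2), (a.1, b.2)], hbc, ?_⟩
    simp only [List.all_cons, List.all_nil, Bool.and_true, Bool.and_eq_true,
      decide_eq_true_eq]
    constructor
    · simpa using ha
    · have : (a.1, b.2) = b := by
        have : a.1 = b.1 := by omega
        rw [this]
      rw [this]
      exact hb
  · -- pvQ s = true : no broken circuit fits
    simp only [pvQ, decide_eq_true_eq] at hq
    simp only [Bool.not_true, List.any_eq_false]
    intro bc hbc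
    simp only [pvBCs, List.mem_flatMap, List.mem_map, PySem.List.mem_pyRange_one] at hbc
    rcases hbc with ⟨i, hi, j, hj, kk, hkk, rfl⟩
    simp only [List.all_cons, List.all_nil, Bool.and_true, Bool.and_eq_true,
      decide_eq_true_eq, not_and]
    intro h1 h2
    have hne : ((i, j) : Int × Int) ≠ (i, kk) := by
      simp only [ne_eq, Prod.mk.injEq, not_and]
      intro _; omega
    have hsymm : Symmetric (fun a b : Int × Int => a.1 ≠ b.1) := fun a b h => Ne.symm h
    exact (hq.forall hsymm h1 h2 hne) rfl

-- sorting is the identity on lex-increasing edge lists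
theorem pv_sorted_id (s : List (Int × Int)) (hpw : s.Pairwise pvLexLt) :
    PySem.List.sorted s (fun p => (toLex p : Int ×ₗ Int)) false = s := by
  apply PySem.List.sorted_eq_self_of_pairwise
  apply hpw.imp
  intro a b h
  rcases h with h | ⟨h1, h2⟩
  · exact le_of_lt (by rw [Prod.Lex.toLex_lt_toLex]; exact Or.inl h)
  · exact le_of_lt (by rw [Prod.Lex.toLex_lt_toLex]; exact Or.inr ⟨h1, h2⟩)

-- A's main branch, written with the ghost names
theorem pv_A_main (n k : Int) (h1 : ¬ k = 0) (h2 : ¬ (n ≤ 1 ∨ n ≤ k)) :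
    nbc_basis n k
      = (combA (pvEdgesFrom n 1) k.toNat).foldl (fun basis s =>
          if (pvBCs n).any (fun bc => bc.all (fun e => decide (e ∈ s))) then basis
          else basis ++ [PySem.List.sorted s (fun p => (toLex p : Int ×ₗ Int)) false]) [] := by
  simp only [nbc_basis, if_neg h1, if_neg h2]
  rfl

theorem pv_B_main (n k : Int) (h1 : ¬ k = 0) (h2 : ¬ (n ≤ 1 ∨ n ≤ k)) (h3 : ¬ k < 0) :
    nbc_basis_alt n k = pvExt n k.toNat 1 := by
  have hk1 : 1 ≤ k := by omega
  have hkn : k < n := by omega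
  have hn2 : 2 ≤ n := by omega
  have hK1 : 1 ≤ k.toNat := by omega
  simp only [nbc_basis_alt, if_neg h1]
  rw [if_neg (by tauto)]
  have hfuel : (n.toNat + 4) ^ (2 * k.toNat + 2) = pvE n ^ (k.toNat + 1) := by
    rw [show 2 * k.toNat + 2 = 2 * (k.toNat + 1) from by ring, pow_mul, pvE]
  have hKn' : ((k.toNat : Nat) : Int) < n := by omega
  have hval0 : pvVal n k.toNat [] 1 2 :=
    ⟨by simp only [List.length_nil]; omega, by omega, by omega, by omega, by omega,
      by intro e he; simp at he⟩
  have hloop := pv_loop n k.toNat hn2 hKn' (pvE n ^ (k.toNat + 1)) [] 1 2 []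
    hval0 (Nat.le_add_left _ _)
  rw [hfuel, hloop, List.nil_append]
  show pvFut n k.toNat [] 1 2 = pvExt n k.toNat 1
  rw [pvFut]
  exact pv_tail_full n k.toNat 1 hK1

-- ===== VERDICT (by name: the statement is the Claim_ definition above) =====
theorem nbc_basis_spec : Claim_unchanged_nbc_basis := by
  intro n k _ hpre hnd
  show nbc_basis n k = nbc_basis_alt n k
  by_cases h0 : k = 0
  · simp [nbc_basis, nbc_basis_alt, h0]
  · by_cases hneg : k < 0
    · exfalso
      apply hnd
      rcases hpre with h | h
      · omega
      · exact ⟨hneg, h⟩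
    · by_cases hg : n ≤ 1 ∨ n ≤ k
      · simp only [nbc_basis, nbc_basis_alt, if_neg h0, if_pos hg]
        rw [if_pos (show (0 : Int) < k by omega), if_pos (by tauto)]
      · rw [pv_A_main n k h0 hg, pv_B_main n k h0 hg hneg]
        rw [pv_foldl_filter _ _ _ []]
        rw [List.nil_append]
        have hpwE : (pvEdgesFrom n 1).Pairwise pvLexLt :=
          pv_edgesFrom_pairwise n ((n + 1 - 1).toNat) 1 rfl
        have hfc : (combA (pvEdgesFrom n 1) k.toNat).filter
              (fun s => !((pvBCs n).any (fun bc => bc.all (fun e => decide (e ∈ s)))))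
            = (combA (pvEdgesFrom n 1) k.toNat).filter pvQ := by
          apply List.filter_congr
          intro s hs
          have hsub := pv_mem_combA_sublist _ _ _ hs
          rw [pv_bc_char n s
            (fun y hy => pv_mem_edgesFrom n 1 y (hsub.subset hy))
            (hpwE.sublist hsub)]
          simp
        rw [hfc]
        have hmapid : ((combA (pvEdgesFrom n 1) k.toNat).filter pvQ).map
              (fun s => PySem.List.sorted s (fun p => (toLex p : Int ×ₗ Int)) false)
            = (combA (pvEdgesFrom n 1) k.toNat).filter pvQ := by
          rw [List.map_congr_left (fun s hs => by
            have hsub := pv_mem_combA_sublist _ _ _ (List.mem_of_mem_filter hs)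
            exact (pv_sorted_id s (hpwE.sublist hsub) : _ = id s))]
          simp
        rw [hmapid, pv_main n k.toNat 1]

theorem nbc_basis_changed : Claim_changed_nbc_basis := by
  unfold Claim_changed_nbc_basis; decide

theorem nbc_basis_tight : Claim_exact_nbc_basis := by
  intro n k _ _ hd
  rcases hd with ⟨hk, hn⟩
  have hA : nbc_basis n k = [[]] := by
    simp only [nbc_basis, if_neg (show ¬ k = 0 by omega),
      if_pos (show n ≤ 1 ∨ n ≤ k from Or.inl hn)]
    rw [if_neg (show ¬ (0 : Int) < k by omega)]
  have hB : nbc_basis_alt n k = [] := by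
    simp only [nbc_basis_alt, if_neg (show ¬ k = 0 by omega)]
    rw [if_pos (Or.inl hk)]
  rw [hA, hB]
  simp
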